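-- pv_equiv track=rewrite | github.com/dnf0/blog-posts | dem-format-benchmark/experiments/test_py_hilbert.py | hilbert_encode
-- ===== SOURCE A (Python) =====
-- def hilbert_encode(x, y):
--     d = 0
--     for i in range(31, -1, -1):
--         rx = (x >> i) & 1
--         ry = (y >> i) & 1
--         quad = (3 * rx) ^ ry
--         d += quad << (2 * i)
--         if ry == 0:
--             if rx == 1:
--                 mask = 0xFFFFFFFF if i == 31 else (1 << (i + 1)) - 1
--                 x = x ^ mask
--                 y = y ^ mask
--             x, y = y, x
--     return d
-- ===== SOURCE B (Python) =====
-- _HILBERT_TABLE = (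
--     (0, 1), (1, 0), (3, 2), (2, 0),   # state 0: identity
--     (0, 0), (3, 3), (1, 1), (2, 1),   # state 1: swap
--     (2, 2), (1, 2), (3, 0), (0, 3),   # state 2: flip+swap
--     (2, 3), (3, 1), (1, 3), (0, 2),   # state 3: flip
-- )
--
-- def hilbert_encode(x, y):
--     d = 0
--     s = 0
--     for i in range(31, -1, -1):
--         bits = 2 * ((x >> i) & 1) + ((y >> i) & 1)
--         quad, s = _HILBERT_TABLE[4 * s + bits]
--         d += quad << (2 * i)
--     return d
-- ===== Notes on version B (the rewrite author's own statement) =====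
-- stated objective: alternative
-- what changed: Replaces A's coordinate-mutating loop (conditional XOR-mask complement and swap of x,y every round) with a table-driven state machine: a precomputed 16-entry transition table maps (orientation state, two input bits) to (quadrant bits, next state), so x and y are never transformed, only a 2-bit orientation state is carried.
import Mathlib
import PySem

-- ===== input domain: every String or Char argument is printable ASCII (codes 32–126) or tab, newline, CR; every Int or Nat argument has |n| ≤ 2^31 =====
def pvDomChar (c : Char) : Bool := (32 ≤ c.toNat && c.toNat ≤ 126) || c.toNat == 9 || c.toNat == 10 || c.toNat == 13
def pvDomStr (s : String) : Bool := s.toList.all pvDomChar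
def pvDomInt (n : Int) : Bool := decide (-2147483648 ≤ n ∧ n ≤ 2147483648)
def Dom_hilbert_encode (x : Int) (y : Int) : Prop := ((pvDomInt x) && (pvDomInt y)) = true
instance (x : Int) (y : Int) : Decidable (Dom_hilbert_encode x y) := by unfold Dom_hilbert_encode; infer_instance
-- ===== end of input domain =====

-- B replaces A's coordinate-mutating loop (conditional XOR-mask and swap of x,y each round) by a
-- table-driven state machine over the four Hilbert orientations that never modifies x or y
-- (objective: alternative; equivalence is proved for ALL Int inputs, no precondition).

-- ===== PORT A =====
-- loop body of A; i ∈ [0,31] throughout, so `i.toNat` / `(2*i).toNat` are exact for Python's `>> i` / `<< 2*i`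
def pvBodyA (st : Int × Int × Int) (i : Int) : Int × Int × Int :=
  let x := st.1; let y := st.2.1; let d := st.2.2
  let rx := PySem.Int.band (x >>> i.toNat) 1
  let ry := PySem.Int.band (y >>> i.toNat) 1
  let quad := PySem.Int.bxor (3 * rx) ry
  let d := d + quad <<< (2 * i).toNat
  if ry = 0 then
    if rx = 1 then
      let mask : Int := if i = 31 then 4294967295 else (1:Int) <<< (i.toNat + 1) - 1
      (PySem.Int.bxor y mask, PySem.Int.bxor x mask, d)
    else (y, x, d)
  else (x, y, d)

def hilbert_encode (x : Int) (y : Int) : Int :=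
  ((PySem.List.pyRange 31 (-1) (-1)).foldl pvBodyA (x, y, 0)).2.2

-- ===== PORT B =====
-- B's transition table: entry 4*s + 2*rx0 + ry0 is (quadrant bits, next orientation state)
def pvHilbertTable : List (Int × Int) :=
  [(0,1),(1,0),(3,2),(2,0),
   (0,0),(3,3),(1,1),(2,1),
   (2,2),(1,2),(3,0),(0,3),
   (2,3),(3,1),(1,3),(0,2)]

-- loop body of B; the table index is always 0..15 here, so the `.getD (0,0)` default of the
-- IndexError-tracking lookup is never taken
def pvBodyB (x : Int) (y : Int) (st : Int × Int) (i : Int) : Int × Int :=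
  let bits := 2 * PySem.Int.band (x >>> i.toNat) 1 + PySem.Int.band (y >>> i.toNat) 1
  let p := (PySem.List.pyGet? pvHilbertTable (4 * st.1 + bits)).getD (0, 0)
  (p.2, st.2 + p.1 <<< (2 * i).toNat)

def hilbert_encode_alt (x : Int) (y : Int) : Int :=
  ((PySem.List.pyRange 31 (-1) (-1)).foldl (pvBodyB x y) (0, 0)).2

-- ===== PRECONDITION & SPEC =====
def Spec_hilbert_encode (x : Int) (y : Int) (out : Int) : Prop := out = hilbert_encode_alt x y
instance (x : Int) (y : Int) (out : Int) : Decidable (Spec_hilbert_encode x y out) := by unfold Spec_hilbert_encode; infer_instance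

-- ===== CLAIM (what is proved, stated in full; the proofs are below) =====
def Claim_equal_hilbert_encode : Prop := ∀ (x : Int) (y : Int), Dom_hilbert_encode x y → Spec_hilbert_encode x y (hilbert_encode x y)

-- ===== LEMMAS AND PROOFS =====

theorem pvNotDiv (m z : Int) (hm : 0 < m) : (-z - 1) / m = -(z / m) - 1 := by
  have h1 : z = m * (z / m) + z % m := (Int.mul_ediv_add_emod z m).symm
  have h2 : 0 ≤ z % m := Int.emod_nonneg z (by omega)
  have h3 : z % m < m := Int.emod_lt_of_pos z hm
  have h : -z - 1 = (m - 1 - z % m) + m * (-(z / m) - 1) := by linarith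
  have h9 : ((m - 1 - z % m) + m * (-(z / m) - 1)) / m = (m - 1 - z % m) / m + (-(z / m) - 1) :=
    Int.add_mul_ediv_left _ _ (by omega)
  have h10 : (m - 1 - z % m) / m = 0 := Int.ediv_eq_zero_of_lt (by omega) (by omega)
  rw [h, h9, h10, zero_add]

theorem pvNotMod (m z : Int) (hm : 0 < m) : (-z - 1) % m = m - 1 - z % m := by
  have h1 : z = m * (z / m) + z % m := (Int.mul_ediv_add_emod z m).symm
  have h4 : -z - 1 = m * ((-z-1)/m) + (-z-1) % m := (Int.mul_ediv_add_emod _ m).symm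
  rw [pvNotDiv m z hm] at h4
  linarith

theorem pvBitDiv (m x : Int) (hm : 0 < m) : x / m % 2 = x % (2 * m) / m := by
  have h1 : x % (2*m) = x - 2*m*(x/(2*m)) := by have := Int.mul_ediv_add_emod x (2*m); linarith
  have h2 : x / (2*m) = x / m / 2 := by
    rw [Int.ediv_ediv_of_nonneg (by omega : (0:Int) ≤ m), mul_comm]
  have h3 : x = m * (x / m) + x % m := (Int.mul_ediv_add_emod x m).symm
  have h6 : x / m % 2 = x / m - 2*(x/m/2) := by have := Int.mul_ediv_add_emod (x/m) 2; linarith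
  have h5 : x % (2*m) = x % m + m * (x / m % 2) := by rw [h1, h2, h6]; ring_nf; linarith [h3]
  have h7 : 0 ≤ x % m := Int.emod_nonneg x (by omega)
  have h8 : x % m < m := Int.emod_lt_of_pos x hm
  have h9 : (x % m + m * (x / m % 2)) / m = (x % m) / m + x / m % 2 :=
    Int.add_mul_ediv_left _ _ (by omega)
  have h10 : (x % m) / m = 0 := Int.ediv_eq_zero_of_lt h7 h8
  rw [h5, h9, h10, zero_add]

theorem pvModSplit (m z : Int) : z % (2 * m) = 2 * (z / 2 % m) + z % 2 := by
  have h2 : z / (2*m) = z / 2 / m := by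
    rw [Int.ediv_ediv_of_nonneg (by omega : (0:Int) ≤ 2)]
  have h1 : z % (2*m) = z - 2*m*(z/2/m) := by have := Int.mul_ediv_add_emod z (2*m); rw [h2] at this; linarith
  have h3 : z/2 % m = z/2 - m*(z/2/m) := by have := Int.mul_ediv_add_emod (z/2) m; linarith
  have h4 : z % 2 = z - 2*(z/2) := by have := Int.mul_ediv_add_emod z 2; linarith
  rw [h1, h3, h4]; ring

theorem pvXorHalf (a b : Int) : PySem.Int.bxor a b = 2 * PySem.Int.bxor (a/2) (b/2) + (a + b) % 2 := by
  have hx : ∀ m n : Nat, (m ^^^ n : Nat) = 2*((m/2) ^^^ (n/2)) + (m + n) % 2 := by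
    intro m n; rw [← Nat.xor_div_two, ← Nat.xor_mod_two_eq]; omega
  unfold PySem.Int.bxor
  by_cases h1 : 0 ≤ a <;> by_cases h2 : 0 ≤ b
  · rw [if_pos h1, if_pos h2, if_pos (show (0:Int) ≤ a/2 by omega), if_pos (show (0:Int) ≤ b/2 by omega)]
    rw [show (a/2).toNat = a.toNat / 2 by omega, show (b/2).toNat = b.toNat / 2 by omega]
    have h := hx a.toNat b.toNat; omega
  · rw [if_pos h1, if_neg h2, if_pos (show (0:Int) ≤ a/2 by omega), if_neg (show ¬ (0:Int) ≤ b/2 by omega)]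
    rw [show (a/2).toNat = a.toNat / 2 by omega, show (-(b/2)-1).toNat = (-b-1).toNat / 2 by omega]
    have h := hx a.toNat (-b-1).toNat; omega
  · rw [if_neg h1, if_pos h2, if_neg (show ¬ (0:Int) ≤ a/2 by omega), if_pos (show (0:Int) ≤ b/2 by omega)]
    rw [show (-(a/2)-1).toNat = (-a-1).toNat / 2 by omega, show (b/2).toNat = b.toNat / 2 by omega]
    have h := hx (-a-1).toNat b.toNat; omega
  · rw [if_neg h1, if_neg h2, if_neg (show ¬ (0:Int) ≤ a/2 by omega), if_neg (show ¬ (0:Int) ≤ b/2 by omega)]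
    rw [show (-(a/2)-1).toNat = (-a-1).toNat / 2 by omega, show (-(b/2)-1).toNat = (-b-1).toNat / 2 by omega]
    have h := hx (-a-1).toNat (-b-1).toNat; omega

theorem pvXorMask (n : Nat) (k : Nat) (x : Int) (h : n ≤ k) :
    PySem.Int.bxor x (2^k - 1) % 2^n = (-x - 1) % 2^n := by
  induction n generalizing k x with
  | zero => simp
  | succ n ih =>
    obtain ⟨k', rfl⟩ : ∃ k', k = k' + 1 := ⟨k - 1, by omega⟩
    have hh := pvXorHalf x (2^(k'+1) - 1)
    have hp : (2:Int)^(k'+1) = 2 * 2^k' := by ring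
    have hd : ((2:Int)^(k'+1) - 1)/2 = 2^k' - 1 := by omega
    rw [hd] at hh
    have hm : (0:Int) < 2^n := by positivity
    have hs1 := pvModSplit (2^n) (PySem.Int.bxor x (2^(k'+1) - 1))
    have hs2 := pvModSplit (2^n) (-x - 1)
    have hq : PySem.Int.bxor x (2^(k'+1) - 1) / 2 = PySem.Int.bxor (x/2) (2^k' - 1) := by omega
    have hr : PySem.Int.bxor x (2^(k'+1) - 1) % 2 = (x + 2^(k'+1) - 1) % 2 := by omega
    have hnd : (-x - 1) / 2 = -(x/2) - 1 := by omega
    have hih := ih k' (x/2) (by omega)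
    have hpn : (2:Int)^(n+1) = 2 * 2^n := by ring
    rw [hpn, hs1, hs2, hq, hr, hnd, hih]
    omega

def pvDesc : Nat → List Int
  | 0 => []
  | n + 1 => (n : Int) :: pvDesc n

def pvTX (s x0 y0 : Int) : Int := if s = 0 then x0 else if s = 1 then y0 else if s = 2 then -y0 - 1 else -x0 - 1
def pvTY (s x0 y0 : Int) : Int := if s = 0 then y0 else if s = 1 then x0 else if s = 2 then -x0 - 1 else -y0 - 1

theorem pvFlipBit (q : Int) : (-q - 1) % 2 = 1 - q % 2 := by omega

theorem t0x (x0 y0 : Int) : pvTX 0 x0 y0 = x0 := rfl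
theorem t1x (x0 y0 : Int) : pvTX 1 x0 y0 = y0 := rfl
theorem t2x (x0 y0 : Int) : pvTX 2 x0 y0 = -y0 - 1 := rfl
theorem t3x (x0 y0 : Int) : pvTX 3 x0 y0 = -x0 - 1 := rfl
theorem t0y (x0 y0 : Int) : pvTY 0 x0 y0 = y0 := rfl
theorem t1y (x0 y0 : Int) : pvTY 1 x0 y0 = x0 := rfl
theorem t2y (x0 y0 : Int) : pvTY 2 x0 y0 = -x0 - 1 := rfl
theorem t3y (x0 y0 : Int) : pvTY 3 x0 y0 = -y0 - 1 := rfl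

theorem pvMain (n : Nat) : ∀ (s x y d x0 y0 : Int),
    (s = 0 ∨ s = 1 ∨ s = 2 ∨ s = 3) →
    x % 2^n = pvTX s x0 y0 % 2^n → y % 2^n = pvTY s x0 y0 % 2^n →
    ((pvDesc n).foldl pvBodyA (x, y, d)).2.2 = ((pvDesc n).foldl (pvBodyB x0 y0) (s, d)).2 := by
  induction n with
  | zero => intro s x y d x0 y0 _ _ _; rfl
  | succ n ih =>
    intro s x y d x0 y0 hs hx hy
    have hM : (0:Int) < 2^n := by positivity
    have hband : ∀ z : Int, PySem.Int.band (z >>> ((n : Int)).toNat) 1 = z / 2^n % 2 := by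
      intro z
      rw [PySem.Int.band_one, PySem.Int.mod_eq_emod_of_pos (by norm_num), Int.toNat_natCast,
        Int.shiftRight_eq_div_pow]
      push_cast; rfl
    have hw : ∀ z w : Int, z % 2^(n+1) = w % 2^(n+1) → z % 2^n = w % 2^n := by
      intro z w hzw
      have hd : (2:Int)^n ∣ 2^(n+1) := ⟨2, by ring⟩
      rw [← Int.emod_emod_of_dvd z hd, hzw, Int.emod_emod_of_dvd _ hd]
    have hneg : ∀ z w : Int, z % 2^n = w % 2^n → (-z-1) % 2^n = (-w-1) % 2^n := by
      intro z w hzw; rw [pvNotMod _ _ hM, pvNotMod _ _ hM, hzw]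
    have hbx : x / 2^n % 2 = pvTX s x0 y0 / 2^n % 2 := by
      rw [pvBitDiv _ _ hM, pvBitDiv _ _ hM, show (2:Int)*2^n = 2^(n+1) by ring, hx]
    have hby : y / 2^n % 2 = pvTY s x0 y0 / 2^n % 2 := by
      rw [pvBitDiv _ _ hM, pvBitDiv _ _ hM, show (2:Int)*2^n = 2^(n+1) by ring, hy]
    have hxl : x % 2^n = pvTX s x0 y0 % 2^n := hw _ _ hx
    have hyl : y % 2^n = pvTY s x0 y0 % 2^n := hw _ _ hy
    have hmask : (if (n:Int) = 31 then (4294967295:Int) else (1:Int) <<< (((n:Int)).toNat + 1) - 1) = 2^(n+1) - 1 := by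
      by_cases h31 : (n:Int) = 31
      · have hn : n = 31 := by exact_mod_cast h31
        subst hn; norm_num
      · rw [if_neg h31, Int.toNat_natCast, Int.shiftLeft_eq, one_mul]
    have hxor : ∀ z : Int, PySem.Int.bxor z (2^(n+1) - 1) % 2^n = (-z-1) % 2^n :=
      fun z => pvXorMask n (n+1) z (by omega)
    have hq00 : PySem.Int.bxor 0 0 = 0 := by decide
    have hq01 : PySem.Int.bxor 0 1 = 1 := by decide
    have hq30 : PySem.Int.bxor 3 0 = 3 := by decide
    have hq31 : PySem.Int.bxor 3 1 = 2 := by decide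
    have ha2 := Int.emod_two_eq (x0 / 2^n)
    have hb2 := Int.emod_two_eq (y0 / 2^n)
    rcases hs with rfl | rfl | rfl | rfl
    · rw [t0x] at hbx hxl
      rw [t0y] at hby hyl
      rcases ha2 with ha | ha <;> rcases hb2 with hb | hb
      · -- s=0 a=0 b=0: rx=0 ry=0 quad=0 next=1
        have hrx : x / 2^n % 2 = 0 := by
          rw [hbx, ha]
        have hry : y / 2^n % 2 = 0 := by
          rw [hby, hb]
        have hstepA : pvBodyA (x, y, d) (n:Int) = (y, x, d + (0:Int) <<< (2*(n:Int)).toNat) := by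
          simp only [pvBodyA, hband, hrx, hry]
          norm_num [hq00, hq01, hq30, hq31]
        have hstepB : pvBodyB x0 y0 (0, d) (n:Int) = (1, d + (0:Int) <<< (2*(n:Int)).toNat) := by
          simp only [pvBodyB, hband]
          rw [ha, hb]
          norm_num [show PySem.List.pyGet? pvHilbertTable 0 = some ((0:Int), (1:Int)) from by decide]
        have hX : (y) % 2^n = pvTX 1 x0 y0 % 2^n := by
          rw [t1x]
          exact hyl
        have hY : (x) % 2^n = pvTY 1 x0 y0 % 2^n := by
          rw [t1y]
          exact hxl
        simp only [pvDesc, List.foldl_cons, hstepA, hstepB]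
        exact ih 1 _ _ _ x0 y0 (by norm_num) hX hY
      · -- s=0 a=0 b=1: rx=0 ry=1 quad=1 next=0
        have hrx : x / 2^n % 2 = 0 := by
          rw [hbx, ha]
        have hry : y / 2^n % 2 = 1 := by
          rw [hby, hb]
        have hstepA : pvBodyA (x, y, d) (n:Int) = (x, y, d + (1:Int) <<< (2*(n:Int)).toNat) := by
          simp only [pvBodyA, hband, hrx, hry]
          norm_num [hq00, hq01, hq30, hq31]
        have hstepB : pvBodyB x0 y0 (0, d) (n:Int) = (0, d + (1:Int) <<< (2*(n:Int)).toNat) := by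
          simp only [pvBodyB, hband]
          rw [ha, hb]
          norm_num [show PySem.List.pyGet? pvHilbertTable 1 = some ((1:Int), (0:Int)) from by decide]
        have hX : (x) % 2^n = pvTX 0 x0 y0 % 2^n := by
          rw [t0x]
          exact hxl
        have hY : (y) % 2^n = pvTY 0 x0 y0 % 2^n := by
          rw [t0y]
          exact hyl
        simp only [pvDesc, List.foldl_cons, hstepA, hstepB]
        exact ih 0 _ _ _ x0 y0 (by norm_num) hX hY
      · -- s=0 a=1 b=0: rx=1 ry=0 quad=3 next=2
        have hrx : x / 2^n % 2 = 1 := by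
          rw [hbx, ha]
        have hry : y / 2^n % 2 = 0 := by
          rw [hby, hb]
        have hstepA : pvBodyA (x, y, d) (n:Int) = (PySem.Int.bxor y (2^(n+1)-1), PySem.Int.bxor x (2^(n+1)-1), d + (3:Int) <<< (2*(n:Int)).toNat) := by
          simp only [pvBodyA, hband, hrx, hry, hmask]
          norm_num [hq00, hq01, hq30, hq31]
        have hstepB : pvBodyB x0 y0 (0, d) (n:Int) = (2, d + (3:Int) <<< (2*(n:Int)).toNat) := by
          simp only [pvBodyB, hband]
          rw [ha, hb]
          norm_num [show PySem.List.pyGet? pvHilbertTable 2 = some ((3:Int), (2:Int)) from by decide]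
        have hX : (PySem.Int.bxor y (2^(n+1)-1)) % 2^n = pvTX 2 x0 y0 % 2^n := by
          rw [t2x]
          rw [hxor]; have h := hneg _ _ hyl; rw [h]
        have hY : (PySem.Int.bxor x (2^(n+1)-1)) % 2^n = pvTY 2 x0 y0 % 2^n := by
          rw [t2y]
          rw [hxor]; have h := hneg _ _ hxl; rw [h]
        simp only [pvDesc, List.foldl_cons, hstepA, hstepB]
        exact ih 2 _ _ _ x0 y0 (by norm_num) hX hY
      · -- s=0 a=1 b=1: rx=1 ry=1 quad=2 next=0
        have hrx : x / 2^n % 2 = 1 := by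
          rw [hbx, ha]
        have hry : y / 2^n % 2 = 1 := by
          rw [hby, hb]
        have hstepA : pvBodyA (x, y, d) (n:Int) = (x, y, d + (2:Int) <<< (2*(n:Int)).toNat) := by
          simp only [pvBodyA, hband, hrx, hry]
          norm_num [hq00, hq01, hq30, hq31]
        have hstepB : pvBodyB x0 y0 (0, d) (n:Int) = (0, d + (2:Int) <<< (2*(n:Int)).toNat) := by
          simp only [pvBodyB, hband]
          rw [ha, hb]
          norm_num [show PySem.List.pyGet? pvHilbertTable 3 = some ((2:Int), (0:Int)) from by decide]
        have hX : (x) % 2^n = pvTX 0 x0 y0 % 2^n := by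
          rw [t0x]
          exact hxl
        have hY : (y) % 2^n = pvTY 0 x0 y0 % 2^n := by
          rw [t0y]
          exact hyl
        simp only [pvDesc, List.foldl_cons, hstepA, hstepB]
        exact ih 0 _ _ _ x0 y0 (by norm_num) hX hY
    · rw [t1x] at hbx hxl
      rw [t1y] at hby hyl
      rcases ha2 with ha | ha <;> rcases hb2 with hb | hb
      · -- s=1 a=0 b=0: rx=0 ry=0 quad=0 next=0
        have hrx : x / 2^n % 2 = 0 := by
          rw [hbx, hb]
        have hry : y / 2^n % 2 = 0 := by
          rw [hby, ha]
        have hstepA : pvBodyA (x, y, d) (n:Int) = (y, x, d + (0:Int) <<< (2*(n:Int)).toNat) := by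
          simp only [pvBodyA, hband, hrx, hry]
          norm_num [hq00, hq01, hq30, hq31]
        have hstepB : pvBodyB x0 y0 (1, d) (n:Int) = (0, d + (0:Int) <<< (2*(n:Int)).toNat) := by
          simp only [pvBodyB, hband]
          rw [ha, hb]
          norm_num [show PySem.List.pyGet? pvHilbertTable 4 = some ((0:Int), (0:Int)) from by decide]
        have hX : (y) % 2^n = pvTX 0 x0 y0 % 2^n := by
          rw [t0x]
          exact hyl
        have hY : (x) % 2^n = pvTY 0 x0 y0 % 2^n := by
          rw [t0y]
          exact hxl
        simp only [pvDesc, List.foldl_cons, hstepA, hstepB]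
        exact ih 0 _ _ _ x0 y0 (by norm_num) hX hY
      · -- s=1 a=0 b=1: rx=1 ry=0 quad=3 next=3
        have hrx : x / 2^n % 2 = 1 := by
          rw [hbx, hb]
        have hry : y / 2^n % 2 = 0 := by
          rw [hby, ha]
        have hstepA : pvBodyA (x, y, d) (n:Int) = (PySem.Int.bxor y (2^(n+1)-1), PySem.Int.bxor x (2^(n+1)-1), d + (3:Int) <<< (2*(n:Int)).toNat) := by
          simp only [pvBodyA, hband, hrx, hry, hmask]
          norm_num [hq00, hq01, hq30, hq31]
        have hstepB : pvBodyB x0 y0 (1, d) (n:Int) = (3, d + (3:Int) <<< (2*(n:Int)).toNat) := by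
          simp only [pvBodyB, hband]
          rw [ha, hb]
          norm_num [show PySem.List.pyGet? pvHilbertTable 5 = some ((3:Int), (3:Int)) from by decide]
        have hX : (PySem.Int.bxor y (2^(n+1)-1)) % 2^n = pvTX 3 x0 y0 % 2^n := by
          rw [t3x]
          rw [hxor]; have h := hneg _ _ hyl; rw [h]
        have hY : (PySem.Int.bxor x (2^(n+1)-1)) % 2^n = pvTY 3 x0 y0 % 2^n := by
          rw [t3y]
          rw [hxor]; have h := hneg _ _ hxl; rw [h]
        simp only [pvDesc, List.foldl_cons, hstepA, hstepB]
        exact ih 3 _ _ _ x0 y0 (by norm_num) hX hY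
      · -- s=1 a=1 b=0: rx=0 ry=1 quad=1 next=1
        have hrx : x / 2^n % 2 = 0 := by
          rw [hbx, hb]
        have hry : y / 2^n % 2 = 1 := by
          rw [hby, ha]
        have hstepA : pvBodyA (x, y, d) (n:Int) = (x, y, d + (1:Int) <<< (2*(n:Int)).toNat) := by
          simp only [pvBodyA, hband, hrx, hry]
          norm_num [hq00, hq01, hq30, hq31]
        have hstepB : pvBodyB x0 y0 (1, d) (n:Int) = (1, d + (1:Int) <<< (2*(n:Int)).toNat) := by
          simp only [pvBodyB, hband]
          rw [ha, hb]
          norm_num [show PySem.List.pyGet? pvHilbertTable 6 = some ((1:Int), (1:Int)) from by decide]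
        have hX : (x) % 2^n = pvTX 1 x0 y0 % 2^n := by
          rw [t1x]
          exact hxl
        have hY : (y) % 2^n = pvTY 1 x0 y0 % 2^n := by
          rw [t1y]
          exact hyl
        simp only [pvDesc, List.foldl_cons, hstepA, hstepB]
        exact ih 1 _ _ _ x0 y0 (by norm_num) hX hY
      · -- s=1 a=1 b=1: rx=1 ry=1 quad=2 next=1
        have hrx : x / 2^n % 2 = 1 := by
          rw [hbx, hb]
        have hry : y / 2^n % 2 = 1 := by
          rw [hby, ha]
        have hstepA : pvBodyA (x, y, d) (n:Int) = (x, y, d + (2:Int) <<< (2*(n:Int)).toNat) := by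
          simp only [pvBodyA, hband, hrx, hry]
          norm_num [hq00, hq01, hq30, hq31]
        have hstepB : pvBodyB x0 y0 (1, d) (n:Int) = (1, d + (2:Int) <<< (2*(n:Int)).toNat) := by
          simp only [pvBodyB, hband]
          rw [ha, hb]
          norm_num [show PySem.List.pyGet? pvHilbertTable 7 = some ((2:Int), (1:Int)) from by decide]
        have hX : (x) % 2^n = pvTX 1 x0 y0 % 2^n := by
          rw [t1x]
          exact hxl
        have hY : (y) % 2^n = pvTY 1 x0 y0 % 2^n := by
          rw [t1y]
          exact hyl
        simp only [pvDesc, List.foldl_cons, hstepA, hstepB]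
        exact ih 1 _ _ _ x0 y0 (by norm_num) hX hY
    · rw [t2x] at hbx hxl
      rw [t2y] at hby hyl
      rcases ha2 with ha | ha <;> rcases hb2 with hb | hb
      · -- s=2 a=0 b=0: rx=1 ry=1 quad=2 next=2
        have hrx : x / 2^n % 2 = 1 := by
          rw [hbx, pvNotDiv _ _ hM, pvFlipBit, hb]
          all_goals norm_num
        have hry : y / 2^n % 2 = 1 := by
          rw [hby, pvNotDiv _ _ hM, pvFlipBit, ha]
          all_goals norm_num
        have hstepA : pvBodyA (x, y, d) (n:Int) = (x, y, d + (2:Int) <<< (2*(n:Int)).toNat) := by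
          simp only [pvBodyA, hband, hrx, hry]
          norm_num [hq00, hq01, hq30, hq31]
        have hstepB : pvBodyB x0 y0 (2, d) (n:Int) = (2, d + (2:Int) <<< (2*(n:Int)).toNat) := by
          simp only [pvBodyB, hband]
          rw [ha, hb]
          norm_num [show PySem.List.pyGet? pvHilbertTable 8 = some ((2:Int), (2:Int)) from by decide]
        have hX : (x) % 2^n = pvTX 2 x0 y0 % 2^n := by
          rw [t2x]
          exact hxl
        have hY : (y) % 2^n = pvTY 2 x0 y0 % 2^n := by
          rw [t2y]
          exact hyl
        simp only [pvDesc, List.foldl_cons, hstepA, hstepB]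
        exact ih 2 _ _ _ x0 y0 (by norm_num) hX hY
      · -- s=2 a=0 b=1: rx=0 ry=1 quad=1 next=2
        have hrx : x / 2^n % 2 = 0 := by
          rw [hbx, pvNotDiv _ _ hM, pvFlipBit, hb]
          all_goals norm_num
        have hry : y / 2^n % 2 = 1 := by
          rw [hby, pvNotDiv _ _ hM, pvFlipBit, ha]
          all_goals norm_num
        have hstepA : pvBodyA (x, y, d) (n:Int) = (x, y, d + (1:Int) <<< (2*(n:Int)).toNat) := by
          simp only [pvBodyA, hband, hrx, hry]
          norm_num [hq00, hq01, hq30, hq31]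
        have hstepB : pvBodyB x0 y0 (2, d) (n:Int) = (2, d + (1:Int) <<< (2*(n:Int)).toNat) := by
          simp only [pvBodyB, hband]
          rw [ha, hb]
          norm_num [show PySem.List.pyGet? pvHilbertTable 9 = some ((1:Int), (2:Int)) from by decide]
        have hX : (x) % 2^n = pvTX 2 x0 y0 % 2^n := by
          rw [t2x]
          exact hxl
        have hY : (y) % 2^n = pvTY 2 x0 y0 % 2^n := by
          rw [t2y]
          exact hyl
        simp only [pvDesc, List.foldl_cons, hstepA, hstepB]
        exact ih 2 _ _ _ x0 y0 (by norm_num) hX hY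
      · -- s=2 a=1 b=0: rx=1 ry=0 quad=3 next=0
        have hrx : x / 2^n % 2 = 1 := by
          rw [hbx, pvNotDiv _ _ hM, pvFlipBit, hb]
          all_goals norm_num
        have hry : y / 2^n % 2 = 0 := by
          rw [hby, pvNotDiv _ _ hM, pvFlipBit, ha]
          all_goals norm_num
        have hstepA : pvBodyA (x, y, d) (n:Int) = (PySem.Int.bxor y (2^(n+1)-1), PySem.Int.bxor x (2^(n+1)-1), d + (3:Int) <<< (2*(n:Int)).toNat) := by
          simp only [pvBodyA, hband, hrx, hry, hmask]
          norm_num [hq00, hq01, hq30, hq31]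
        have hstepB : pvBodyB x0 y0 (2, d) (n:Int) = (0, d + (3:Int) <<< (2*(n:Int)).toNat) := by
          simp only [pvBodyB, hband]
          rw [ha, hb]
          norm_num [show PySem.List.pyGet? pvHilbertTable 10 = some ((3:Int), (0:Int)) from by decide]
        have hX : (PySem.Int.bxor y (2^(n+1)-1)) % 2^n = pvTX 0 x0 y0 % 2^n := by
          rw [t0x]
          rw [hxor]; have h := hneg _ _ hyl; rw [h]
          all_goals ring_nf
        have hY : (PySem.Int.bxor x (2^(n+1)-1)) % 2^n = pvTY 0 x0 y0 % 2^n := by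
          rw [t0y]
          rw [hxor]; have h := hneg _ _ hxl; rw [h]
          all_goals ring_nf
        simp only [pvDesc, List.foldl_cons, hstepA, hstepB]
        exact ih 0 _ _ _ x0 y0 (by norm_num) hX hY
      · -- s=2 a=1 b=1: rx=0 ry=0 quad=0 next=3
        have hrx : x / 2^n % 2 = 0 := by
          rw [hbx, pvNotDiv _ _ hM, pvFlipBit, hb]
          all_goals norm_num
        have hry : y / 2^n % 2 = 0 := by
          rw [hby, pvNotDiv _ _ hM, pvFlipBit, ha]
          all_goals norm_num
        have hstepA : pvBodyA (x, y, d) (n:Int) = (y, x, d + (0:Int) <<< (2*(n:Int)).toNat) := by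
          simp only [pvBodyA, hband, hrx, hry]
          norm_num [hq00, hq01, hq30, hq31]
        have hstepB : pvBodyB x0 y0 (2, d) (n:Int) = (3, d + (0:Int) <<< (2*(n:Int)).toNat) := by
          simp only [pvBodyB, hband]
          rw [ha, hb]
          norm_num [show PySem.List.pyGet? pvHilbertTable 11 = some ((0:Int), (3:Int)) from by decide]
        have hX : (y) % 2^n = pvTX 3 x0 y0 % 2^n := by
          rw [t3x]
          exact hyl
        have hY : (x) % 2^n = pvTY 3 x0 y0 % 2^n := by
          rw [t3y]
          exact hxl
        simp only [pvDesc, List.foldl_cons, hstepA, hstepB]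
        exact ih 3 _ _ _ x0 y0 (by norm_num) hX hY
    · rw [t3x] at hbx hxl
      rw [t3y] at hby hyl
      rcases ha2 with ha | ha <;> rcases hb2 with hb | hb
      · -- s=3 a=0 b=0: rx=1 ry=1 quad=2 next=3
        have hrx : x / 2^n % 2 = 1 := by
          rw [hbx, pvNotDiv _ _ hM, pvFlipBit, ha]
          all_goals norm_num
        have hry : y / 2^n % 2 = 1 := by
          rw [hby, pvNotDiv _ _ hM, pvFlipBit, hb]
          all_goals norm_num
        have hstepA : pvBodyA (x, y, d) (n:Int) = (x, y, d + (2:Int) <<< (2*(n:Int)).toNat) := by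
          simp only [pvBodyA, hband, hrx, hry]
          norm_num [hq00, hq01, hq30, hq31]
        have hstepB : pvBodyB x0 y0 (3, d) (n:Int) = (3, d + (2:Int) <<< (2*(n:Int)).toNat) := by
          simp only [pvBodyB, hband]
          rw [ha, hb]
          norm_num [show PySem.List.pyGet? pvHilbertTable 12 = some ((2:Int), (3:Int)) from by decide]
        have hX : (x) % 2^n = pvTX 3 x0 y0 % 2^n := by
          rw [t3x]
          exact hxl
        have hY : (y) % 2^n = pvTY 3 x0 y0 % 2^n := by
          rw [t3y]
          exact hyl
        simp only [pvDesc, List.foldl_cons, hstepA, hstepB]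
        exact ih 3 _ _ _ x0 y0 (by norm_num) hX hY
      · -- s=3 a=0 b=1: rx=1 ry=0 quad=3 next=1
        have hrx : x / 2^n % 2 = 1 := by
          rw [hbx, pvNotDiv _ _ hM, pvFlipBit, ha]
          all_goals norm_num
        have hry : y / 2^n % 2 = 0 := by
          rw [hby, pvNotDiv _ _ hM, pvFlipBit, hb]
          all_goals norm_num
        have hstepA : pvBodyA (x, y, d) (n:Int) = (PySem.Int.bxor y (2^(n+1)-1), PySem.Int.bxor x (2^(n+1)-1), d + (3:Int) <<< (2*(n:Int)).toNat) := by
          simp only [pvBodyA, hband, hrx, hry, hmask]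
          norm_num [hq00, hq01, hq30, hq31]
        have hstepB : pvBodyB x0 y0 (3, d) (n:Int) = (1, d + (3:Int) <<< (2*(n:Int)).toNat) := by
          simp only [pvBodyB, hband]
          rw [ha, hb]
          norm_num [show PySem.List.pyGet? pvHilbertTable 13 = some ((3:Int), (1:Int)) from by decide]
        have hX : (PySem.Int.bxor y (2^(n+1)-1)) % 2^n = pvTX 1 x0 y0 % 2^n := by
          rw [t1x]
          rw [hxor]; have h := hneg _ _ hyl; rw [h]
          all_goals ring_nf
        have hY : (PySem.Int.bxor x (2^(n+1)-1)) % 2^n = pvTY 1 x0 y0 % 2^n := by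
          rw [t1y]
          rw [hxor]; have h := hneg _ _ hxl; rw [h]
          all_goals ring_nf
        simp only [pvDesc, List.foldl_cons, hstepA, hstepB]
        exact ih 1 _ _ _ x0 y0 (by norm_num) hX hY
      · -- s=3 a=1 b=0: rx=0 ry=1 quad=1 next=3
        have hrx : x / 2^n % 2 = 0 := by
          rw [hbx, pvNotDiv _ _ hM, pvFlipBit, ha]
          all_goals norm_num
        have hry : y / 2^n % 2 = 1 := by
          rw [hby, pvNotDiv _ _ hM, pvFlipBit, hb]
          all_goals norm_num
        have hstepA : pvBodyA (x, y, d) (n:Int) = (x, y, d + (1:Int) <<< (2*(n:Int)).toNat) := by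
          simp only [pvBodyA, hband, hrx, hry]
          norm_num [hq00, hq01, hq30, hq31]
        have hstepB : pvBodyB x0 y0 (3, d) (n:Int) = (3, d + (1:Int) <<< (2*(n:Int)).toNat) := by
          simp only [pvBodyB, hband]
          rw [ha, hb]
          norm_num [show PySem.List.pyGet? pvHilbertTable 14 = some ((1:Int), (3:Int)) from by decide]
        have hX : (x) % 2^n = pvTX 3 x0 y0 % 2^n := by
          rw [t3x]
          exact hxl
        have hY : (y) % 2^n = pvTY 3 x0 y0 % 2^n := by
          rw [t3y]
          exact hyl
        simp only [pvDesc, List.foldl_cons, hstepA, hstepB]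
        exact ih 3 _ _ _ x0 y0 (by norm_num) hX hY
      · -- s=3 a=1 b=1: rx=0 ry=0 quad=0 next=2
        have hrx : x / 2^n % 2 = 0 := by
          rw [hbx, pvNotDiv _ _ hM, pvFlipBit, ha]
          all_goals norm_num
        have hry : y / 2^n % 2 = 0 := by
          rw [hby, pvNotDiv _ _ hM, pvFlipBit, hb]
          all_goals norm_num
        have hstepA : pvBodyA (x, y, d) (n:Int) = (y, x, d + (0:Int) <<< (2*(n:Int)).toNat) := by
          simp only [pvBodyA, hband, hrx, hry]
          norm_num [hq00, hq01, hq30, hq31]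
        have hstepB : pvBodyB x0 y0 (3, d) (n:Int) = (2, d + (0:Int) <<< (2*(n:Int)).toNat) := by
          simp only [pvBodyB, hband]
          rw [ha, hb]
          norm_num [show PySem.List.pyGet? pvHilbertTable 15 = some ((0:Int), (2:Int)) from by decide]
        have hX : (y) % 2^n = pvTX 2 x0 y0 % 2^n := by
          rw [t2x]
          exact hyl
        have hY : (x) % 2^n = pvTY 2 x0 y0 % 2^n := by
          rw [t2y]
          exact hxl
        simp only [pvDesc, List.foldl_cons, hstepA, hstepB]
        exact ih 2 _ _ _ x0 y0 (by norm_num) hX hY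


theorem pvRangeDesc : PySem.List.pyRange 31 (-1) (-1) = pvDesc 32 := by decide

-- ===== VERDICT (by name: the statement is the Claim_ definition above) =====
theorem hilbert_encode_spec : Claim_equal_hilbert_encode := by
  intro x y _
  show hilbert_encode x y = hilbert_encode_alt x y
  unfold hilbert_encode hilbert_encode_alt
  rw [pvRangeDesc]
  exact pvMain 32 0 x y 0 x y (by norm_num) rfl rfl
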